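-- pv_equiv track=rewrite | github.com/ni851ste/psycho_stuff | src/tasks.py | repeated_letter
-- ===== SOURCE A (Python) =====
-- def repeated_letter(instr):
--     prev_char = ""
--     for char in instr:
--         # check if char is letter
--         if not char.isalpha():
--             prev_char = ""
--             continue
--         if char == prev_char:
--             return True
--         prev_char = char
--     return False
-- ===== SOURCE B (Python) =====
-- from itertools import groupby
--
--
-- def repeated_letter(instr):
--     return any(k.isalpha() and sum(1 for _ in g) >= 2 for k, g in groupby(instr))
-- ===== Notes on version B (the rewrite author's own statement) =====
-- stated objective: idiomatic
-- what changed: B splits the string into maximal runs of identical characters with itertools.groupby and reports whether any alphabetic run has length >= 2, instead of threading a prev_char sentinel through a manual scan with early return.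
import Mathlib
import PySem

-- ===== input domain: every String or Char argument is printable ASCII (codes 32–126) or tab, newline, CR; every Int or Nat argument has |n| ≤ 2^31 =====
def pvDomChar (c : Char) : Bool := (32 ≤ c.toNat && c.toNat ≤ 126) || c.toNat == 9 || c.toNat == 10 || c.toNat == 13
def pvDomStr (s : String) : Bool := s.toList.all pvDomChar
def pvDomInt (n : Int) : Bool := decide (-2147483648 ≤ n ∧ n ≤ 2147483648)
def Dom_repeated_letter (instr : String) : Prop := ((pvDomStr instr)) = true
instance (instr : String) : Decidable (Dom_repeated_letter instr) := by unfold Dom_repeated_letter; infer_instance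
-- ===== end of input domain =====

-- B detects an adjacent repeated alphabetic character by splitting the string into maximal
-- runs of identical characters (itertools.groupby) instead of A's prev_char sentinel scan;
-- objective: more idiomatic, same O(n) cost.

-- ===== PORT A =====
-- prev_char = "" is modelled as `none`; prev_char = <letter c> as `some c`.
def pvGoA : List Char → Option Char → Bool
  | [], _ => false
  | c :: rest, prev =>
    if !(PySem.Chars.isalpha c) then pvGoA rest none
    else if prev == some c then true
    else pvGoA rest (some c)

def repeated_letter (instr : String) : Bool := pvGoA instr.toList none

-- ===== PORT B =====
-- itertools.groupby: maximal runs of identical consecutive characters, as (key, run length).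
def pvRuns : List Char → List (Char × Nat)
  | [] => []
  | c :: rest =>
    (c, (rest.takeWhile (· == c)).length + 1) :: pvRuns (rest.dropWhile (· == c))
termination_by l => l.length
decreasing_by
  simpa using Nat.lt_succ_of_le (List.length_dropWhile_le _ _)

def repeated_letter_alt (instr : String) : Bool :=
  (pvRuns instr.toList).any (fun kn => PySem.Chars.isalpha kn.1 && decide (2 ≤ kn.2))

-- ===== PRECONDITION & SPEC =====
def Spec_repeated_letter (instr : String) (out : Bool) : Prop := out = repeated_letter_alt instr
instance (instr : String) (out : Bool) : Decidable (Spec_repeated_letter instr out) := by unfold Spec_repeated_letter; infer_instance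

-- ===== CLAIM (what is proved, stated in full; the proofs are below) =====
def Claim_equal_repeated_letter : Prop := ∀ (instr : String), Dom_repeated_letter instr → Spec_repeated_letter instr (repeated_letter instr)

-- ===== LEMMAS AND PROOFS =====

-- common characterisation: some adjacent pair of equal alphabetic characters exists
def pvAdj : List Char → Bool
  | a :: b :: r => (PySem.Chars.isalpha a && a == b) || pvAdj (b :: r)
  | _ => false

theorem pvGoA_some (rest : List Char) (c p : Char) :
    pvGoA (c :: rest) (some p) =
      ((PySem.Chars.isalpha c && c == p) || pvGoA (c :: rest) none) := by
  by_cases ha : PySem.Chars.isalpha c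
  · by_cases hp : p = c
    · subst hp; simp [pvGoA, ha]
    · have : ¬ c = p := fun h => hp h.symm
      simp [pvGoA, ha, hp, this]
  · simp [pvGoA, ha]

theorem pvGoA_none_eq_adj : ∀ xs : List Char, pvGoA xs none = pvAdj xs := by
  intro xs
  induction xs with
  | nil => rfl
  | cons c rest ih =>
    cases rest with
    | nil =>
      by_cases ha : PySem.Chars.isalpha c <;> simp [pvGoA, pvAdj, ha]
    | cons b r =>
      by_cases ha : PySem.Chars.isalpha c
      · have h1 : pvGoA (c :: b :: r) none = pvGoA (b :: r) (some c) := by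
          simp [pvGoA, ha]
        rw [h1, pvGoA_some, ih]
        show ((PySem.Chars.isalpha b && b == c) || pvAdj (b :: r))
            = ((PySem.Chars.isalpha c && c == b) || pvAdj (b :: r))
        by_cases hbc : b = c
        · subst hbc; simp
        · have h2 : (b == c) = false := by simpa using hbc
          have h3 : (c == b) = false := by
            simpa using fun h => hbc h.symm
          simp [h2, h3]
      · have h1 : pvGoA (c :: b :: r) none = pvGoA (b :: r) none := by
          simp [pvGoA, ha]
        rw [h1, ih]
        simp [pvAdj, ha]

theorem pvAdj_cons_not_alpha (c : Char) (xs : List Char)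
    (h : PySem.Chars.isalpha c = false) : pvAdj (c :: xs) = pvAdj xs := by
  cases xs with
  | nil => rfl
  | cons b r => simp [pvAdj, h]

theorem pvAdj_run_not_alpha (c : Char) (h : PySem.Chars.isalpha c = false) :
    ∀ (eqs rest : List Char), (∀ e ∈ eqs, e = c) →
      pvAdj (eqs ++ rest) = pvAdj rest := by
  intro eqs
  induction eqs with
  | nil => intro rest _; rfl
  | cons e es ih =>
    intro rest hall
    have he : e = c := hall e (by simp)
    have : pvAdj (e :: (es ++ rest)) = pvAdj (es ++ rest) := by
      apply pvAdj_cons_not_alpha; rw [he]; exact h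
    simpa [this] using ih rest (fun x hx => hall x (by simp [hx]))

theorem pvRuns_any_eq_adj : ∀ (n : ℕ) (xs : List Char), xs.length ≤ n →
    (pvRuns xs).any (fun kn => PySem.Chars.isalpha kn.1 && decide (2 ≤ kn.2)) = pvAdj xs := by
  intro n
  induction n with
  | zero =>
    intro xs h
    have : xs = [] := List.eq_nil_of_length_eq_zero (Nat.le_zero.mp h)
    subst this; simp [pvRuns, pvAdj]
  | succ n ih =>
    intro xs h
    cases xs with
    | nil => simp [pvRuns, pvAdj]
    | cons c rest =>
      have hlen : rest.length ≤ n := Nat.lt_succ_iff.mp (by simpa using h)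
      rw [pvRuns]
      by_cases ha : PySem.Chars.isalpha c
      · cases htw : rest.takeWhile (· == c) with
        | nil =>
          have hdw : rest.dropWhile (· == c) = rest := by
            cases rest with
            | nil => rfl
            | cons b r =>
              have hb : (b == c) = false := by
                by_contra hx
                simp [List.takeWhile, eq_true_of_ne_false hx] at htw
              simp [List.dropWhile, hb]
          have hrec := ih rest hlen
          cases rest with
          | nil => simp [pvRuns, pvAdj]
          | cons b r =>
            have hb : (b == c) = false := by
              by_contra hx
              simp [List.takeWhile, eq_true_of_ne_false hx] at htw
            have hcb : (c == b) = false := by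
              simp only [beq_eq_false_iff_ne] at hb ⊢
              exact fun hh => hb hh.symm
            simp only [hdw] at *
            simp [List.any_cons, hrec, pvAdj, hcb]
        | cons e es =>
          cases rest with
          | nil => simp at htw
          | cons b r =>
            have hb : (b == c) = true := by
              by_contra hx
              simp [List.takeWhile, eq_false_of_ne_true hx] at htw
            have hbc : b = c := by simpa using hb
            have hcb : (c == b) = true := by simp [hbc]
            simp [List.any_cons, pvAdj, ha, hcb]
      · have hall : ∀ e ∈ rest.takeWhile (· == c), e = c := by
          intro e hm
          simpa using List.mem_takeWhile_imp hm
        have ha' : PySem.Chars.isalpha c = false := eq_false_of_ne_true ha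
        have h1 : pvAdj (c :: rest) = pvAdj rest := pvAdj_cons_not_alpha c rest ha'
        have h2 : pvAdj rest = pvAdj (rest.dropWhile (· == c)) := by
          conv_lhs => rw [← List.takeWhile_append_dropWhile (p := (· == c)) (l := rest)]
          exact pvAdj_run_not_alpha c ha' _ _ hall
        have h3 := ih (rest.dropWhile (· == c))
          (le_trans (List.length_dropWhile_le _ _) hlen)
        simp [List.any_cons, ha', h1, h2, h3]

-- ===== VERDICT (by name: the statement is the Claim_ definition above) =====
theorem repeated_letter_spec : Claim_equal_repeated_letter := by
  intro instr _
  show repeated_letter instr = repeated_letter_alt instr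
  unfold repeated_letter repeated_letter_alt
  rw [pvGoA_none_eq_adj, pvRuns_any_eq_adj instr.toList.length _ le_rfl]
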